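-- pv_equiv track=rewrite | github.com/wzzClementine/workflow3 | app/utils/cut_solutions.py | merge_text_lines_to_question_blocks
-- ===== SOURCE A (Python) =====
-- def merge_text_lines_to_question_blocks(rects, y_gap_threshold=120):
--     """
--     将相邻的黑色文本行矩形，按纵向距离合并成“题块”。
--     rects: [(x, y, w, h), ...]，已经按 y 排序
--     返回: merged_blocks = [(x, y, w, h), ...]
--     """
--     if not rects:
--         return []
--
--     rects = sorted(rects, key=lambda r: r[1])
--
--     merged = []
--     cur_x, cur_y, cur_w, cur_h = rects[0]
--
--     for x, y, w, h in rects[1:]: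
--         cur_bottom = cur_y + cur_h
--
--         # 如果下一行和当前块足够近，就合并
--         if y - cur_bottom <= y_gap_threshold:
--             new_x1 = min(cur_x, x)
--             new_y1 = min(cur_y, y)
--             new_x2 = max(cur_x + cur_w, x + w)
--             new_y2 = max(cur_y + cur_h, y + h)
--
--             cur_x = new_x1
--             cur_y = new_y1
--             cur_w = new_x2 - new_x1
--             cur_h = new_y2 - new_y1
--         else:
--             merged.append((cur_x, cur_y, cur_w, cur_h))
--             cur_x, cur_y, cur_w, cur_h = x, y, w, h
--
--     merged.append((cur_x, cur_y, cur_w, cur_h))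
--     return merged
-- ===== SOURCE B (Python) =====
-- def _bbox(group):
--     x1, y1 = group[0][0], group[0][1]
--     x2, y2 = group[0][0] + group[0][2], group[0][1] + group[0][3]
--     for x, y, w, h in group[1:]:
--         x1 = min(x1, x)
--         y1 = min(y1, y)
--         x2 = max(x2, x + w)
--         y2 = max(y2, y + h)
--     return (x1, y1, x2 - x1, y2 - y1)
--
--
-- def merge_text_lines_to_question_blocks(rects, y_gap_threshold=120):
--     if not rects:
--         return []
--     srt = sorted(rects, key=lambda r: r[1])
--     # pass 1: partition into groups by vertical gap to the running block bottom
--     groups = [[srt[0]]]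
--     bottom = srt[0][1] + srt[0][3]
--     for r in srt[1:]:
--         if r[1] - bottom > y_gap_threshold:
--             groups.append([r])
--             bottom = r[1] + r[3]
--         else:
--             groups[-1].append(r)
--             bottom = max(bottom, r[1] + r[3])
--     # pass 2: reduce each group to its bounding box
--     return [_bbox(g) for g in groups]
-- ===== Notes on version B (the rewrite author's own statement) =====
-- stated objective: alternative
-- what changed: Replaced A's interleaved accumulate-and-emit loop (mutating one running rect) with two clean passes: first partition the y-sorted rects into groups by gap to the running block bottom, then reduce each group to its bounding box.
import Mathlib
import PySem

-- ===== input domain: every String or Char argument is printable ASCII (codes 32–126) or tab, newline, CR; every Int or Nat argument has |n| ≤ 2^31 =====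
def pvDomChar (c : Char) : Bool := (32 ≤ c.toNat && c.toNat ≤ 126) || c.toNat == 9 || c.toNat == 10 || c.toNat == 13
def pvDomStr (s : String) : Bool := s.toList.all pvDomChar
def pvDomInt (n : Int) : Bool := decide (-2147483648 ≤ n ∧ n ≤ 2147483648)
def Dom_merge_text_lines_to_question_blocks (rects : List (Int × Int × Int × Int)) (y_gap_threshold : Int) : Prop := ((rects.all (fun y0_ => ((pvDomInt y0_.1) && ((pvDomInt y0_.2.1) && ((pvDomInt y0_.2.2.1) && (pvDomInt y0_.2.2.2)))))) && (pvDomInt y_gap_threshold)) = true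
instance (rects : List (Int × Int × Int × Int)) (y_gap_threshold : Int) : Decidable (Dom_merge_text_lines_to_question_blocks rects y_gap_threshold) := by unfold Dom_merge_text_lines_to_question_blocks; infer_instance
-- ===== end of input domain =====

-- B rewrites A's interleaved accumulate-and-emit loop as two passes (partition into groups,
-- then reduce each group to its bounding box); same cost, different decomposition.

-- ===== PORT A =====
-- one iteration of A's for-loop: state = (merged list so far, current block)
def pvStepA (ygt : Int) (st : List (Int × Int × Int × Int) × (Int × Int × Int × Int))
    (r : Int × Int × Int × Int) : List (Int × Int × Int × Int) × (Int × Int × Int × Int) :=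
  let (cx, cy, cw, ch) := st.2
  let (x, y, w, h) := r
  let curBottom := cy + ch
  if y - curBottom ≤ ygt then
    let nx1 := min cx x
    let ny1 := min cy y
    let nx2 := max (cx + cw) (x + w)
    let ny2 := max (cy + ch) (y + h)
    (st.1, (nx1, ny1, nx2 - nx1, ny2 - ny1))
  else
    (st.1 ++ [st.2], r)

def merge_text_lines_to_question_blocks (rects : List (Int × Int × Int × Int)) (y_gap_threshold : Int) : List (Int × Int × Int × Int) :=
  match rects with
  | [] => []
  | _ :: _ =>
    match PySem.List.sorted rects (key := fun r => r.2.1) with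
    | [] => []  -- unreachable: sorting a nonempty list
    | r0 :: rest =>
      let st := rest.foldl (pvStepA y_gap_threshold) ([], r0)
      st.1 ++ [st.2]

-- ===== PORT B =====
-- Source B's _bbox: fold over group[1:] maintaining (x1, y1, x2, y2); [] is unreachable (groups are nonempty)
def pvBbox (g : List (Int × Int × Int × Int)) : Int × Int × Int × Int :=
  match g with
  | [] => (0, 0, 0, 0)
  | r :: rs =>
    let b := rs.foldl
      (fun a q => (min a.1 q.1, min a.2.1 q.2.1, max a.2.2.1 (q.1 + q.2.2.1), max a.2.2.2 (q.2.1 + q.2.2.2)))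
      (r.1, r.2.1, r.1 + r.2.2.1, r.2.1 + r.2.2.2)
    (b.1, b.2.1, b.2.2.1 - b.1, b.2.2.2 - b.2.1)

-- Source B's pass-1 loop body; python's `groups` list is represented as done ++ [current group]:
-- state = (finished groups, current (last) group, running block bottom)
def pvStepB (ygt : Int)
    (st : List (List (Int × Int × Int × Int)) × List (Int × Int × Int × Int) × Int)
    (r : Int × Int × Int × Int) :
    List (List (Int × Int × Int × Int)) × List (Int × Int × Int × Int) × Int :=
  if r.2.1 - st.2.2 > ygt then
    (st.1 ++ [st.2.1], [r], r.2.1 + r.2.2.2)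
  else
    (st.1, st.2.1 ++ [r], max st.2.2 (r.2.1 + r.2.2.2))

def merge_text_lines_to_question_blocks_alt (rects : List (Int × Int × Int × Int)) (y_gap_threshold : Int) : List (Int × Int × Int × Int) :=
  match rects with
  | [] => []
  | _ :: _ =>
    match PySem.List.sorted rects (key := fun r => r.2.1) with
    | [] => []  -- unreachable: sorting a nonempty list
    | r0 :: rest =>
      let st := rest.foldl (pvStepB y_gap_threshold) ([], [r0], r0.2.1 + r0.2.2.2)
      (st.1 ++ [st.2.1]).map pvBbox

-- ===== PRECONDITION & SPEC =====
def Spec_merge_text_lines_to_question_blocks (rects : List (Int × Int × Int × Int)) (y_gap_threshold : Int) (out : List (Int × Int × Int × Int)) : Prop := out = merge_text_lines_to_question_blocks_alt rects y_gap_threshold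
instance (rects : List (Int × Int × Int × Int)) (y_gap_threshold : Int) (out : List (Int × Int × Int × Int)) : Decidable (Spec_merge_text_lines_to_question_blocks rects y_gap_threshold out) := by unfold Spec_merge_text_lines_to_question_blocks; infer_instance

-- ===== CLAIM =====
def Claim_equal_merge_text_lines_to_question_blocks : Prop := ∀ (rects : List (Int × Int × Int × Int)) (y_gap_threshold : Int), Dom_merge_text_lines_to_question_blocks rects y_gap_threshold → Spec_merge_text_lines_to_question_blocks rects y_gap_threshold (merge_text_lines_to_question_blocks rects y_gap_threshold)

-- ===== LEMMAS AND PROOFS =====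

-- the bounding box of a singleton group is the rect itself
theorem pvBbox_singleton (r : Int × Int × Int × Int) : pvBbox [r] = r := by
  obtain ⟨x, y, w, h⟩ := r
  simp [pvBbox]

-- appending one rect to a nonempty group merges its bbox exactly as A's merge branch does
theorem pvBbox_append (g : List (Int × Int × Int × Int)) (hg : g ≠ [])
    (r : Int × Int × Int × Int) :
    pvBbox (g ++ [r]) =
      (min (pvBbox g).1 r.1, min (pvBbox g).2.1 r.2.1,
       max ((pvBbox g).1 + (pvBbox g).2.2.1) (r.1 + r.2.2.1) - min (pvBbox g).1 r.1,
       max ((pvBbox g).2.1 + (pvBbox g).2.2.2) (r.2.1 + r.2.2.2) - min (pvBbox g).2.1 r.2.1) := by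
  obtain ⟨r0, rs, rfl⟩ : ∃ r0 rs, g = r0 :: rs := by
    cases g with
    | nil => exact absurd rfl hg
    | cons a l => exact ⟨a, l, rfl⟩
  simp only [pvBbox, List.cons_append, List.foldl_append, List.foldl_cons, List.foldl_nil]
  generalize (List.foldl
      (fun a q => (min a.1 q.1, min a.2.1 q.2.1, max a.2.2.1 (q.1 + q.2.2.1), max a.2.2.2 (q.2.1 + q.2.2.2)))
      (r0.1, r0.2.1, r0.1 + r0.2.2.1, r0.2.1 + r0.2.2.2) rs) = b
  obtain ⟨b1, b2, b3, b4⟩ := b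
  simp only [Prod.mk.injEq]
  exact ⟨trivial, trivial, by omega, by omega⟩

-- main loop invariant
theorem pv_main (ygt : Int) (rest : List (Int × Int × Int × Int)) :
    ∀ (done : List (List (Int × Int × Int × Int))) (g : List (Int × Int × Int × Int)),
      g ≠ [] →
      (let stA := rest.foldl (pvStepA ygt) (done.map pvBbox, pvBbox g)
       let stB := rest.foldl (pvStepB ygt) (done, g, (pvBbox g).2.1 + (pvBbox g).2.2.2)
       stA.1 ++ [stA.2] = (stB.1 ++ [stB.2.1]).map pvBbox) := by
  induction rest with
  | nil =>
    intro done g hg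
    simp [List.map_append]
  | cons r rest ih =>
    intro done g hg
    simp only [List.foldl_cons]
    by_cases hcond : r.2.1 - ((pvBbox g).2.1 + (pvBbox g).2.2.2) ≤ ygt
    · -- merge branch
      have hA : pvStepA ygt (done.map pvBbox, pvBbox g) r = (done.map pvBbox, pvBbox (g ++ [r])) := by
        rw [pvBbox_append g hg r]
        simp only [pvStepA]
        rw [if_pos hcond]
      have hB : pvStepB ygt (done, g, (pvBbox g).2.1 + (pvBbox g).2.2.2) r
          = (done, g ++ [r], (pvBbox (g ++ [r])).2.1 + (pvBbox (g ++ [r])).2.2.2) := by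
        simp only [pvStepB]
        rw [if_neg (by omega)]
        rw [pvBbox_append g hg r]
        simp only
        congr 2
        omega
      rw [hA, hB]
      exact ih done (g ++ [r]) (by simp)
    · -- flush branch
      have hA : pvStepA ygt (done.map pvBbox, pvBbox g) r = (done.map pvBbox ++ [pvBbox g], r) := by
        simp only [pvStepA]
        rw [if_neg hcond]
      have hB : pvStepB ygt (done, g, (pvBbox g).2.1 + (pvBbox g).2.2.2) r
          = (done ++ [g], [r], r.2.1 + r.2.2.2) := by
        simp only [pvStepB]
        rw [if_pos (by omega)]
      rw [hA, hB]
      have := ih (done ++ [g]) [r] (by simp)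
      simpa [pvBbox_singleton, List.map_append] using this

-- ===== VERDICT =====
theorem merge_text_lines_to_question_blocks_spec : Claim_equal_merge_text_lines_to_question_blocks := by
  intro rects ygt _
  unfold Spec_merge_text_lines_to_question_blocks
  unfold merge_text_lines_to_question_blocks merge_text_lines_to_question_blocks_alt
  cases rects with
  | nil => rfl
  | cons a l =>
    simp only
    cases hs : PySem.List.sorted (a :: l) (key := fun r => r.2.1) with
    | nil => rfl
    | cons r0 rest =>
      have := pv_main ygt rest [] [r0] (by simp)
      simpa [pvBbox_singleton] using this
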